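-- pv_equiv track=rewrite | github.com/py1sl/neutron_tools | mcnp_output_reader.py | eng_time_get_eng_bins
-- ===== SOURCE A (Python) =====
-- def eng_time_get_eng_bins(data):
--     """ for an energy and time binned tally get the energy
--         bin boundary values
--     """
--     energy_bins = []
--     in_data = False
--     for line in data:
--         if in_data:
--             if "total" in line:
--                 in_data = False
--                 break
--             line = " ".join(line.split())
--             erg = line.split(" ")[0]
--             energy_bins.append(erg)
--         elif not in_data:
--             if "energy" in line:
--                 in_data = True
--
--     # add the total line
--     energy_bins.append("total")
--
--     return energy_bins
-- ===== SOURCE B (Python) =====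
-- def _first_token(line):
--     parts = line.split()
--     return parts[0] if parts else ""
--
--
-- def eng_time_get_eng_bins(data):
--     """ for an energy and time binned tally get the energy
--         bin boundary values
--     """
--     lines = list(data)
--     n = len(lines)
--     start = next((i + 1 for i, l in enumerate(lines) if "energy" in l), n)
--     stop = next((j for j in range(start, n) if "total" in lines[j]), n)
--     return [_first_token(l) for l in lines[start:stop]] + ["total"]
-- ===== Notes on version B (the rewrite author's own statement) =====
-- stated objective: idiomatic
-- what changed: A's single loop with a mutable in_data boolean flag is replaced by two explicit index computations (position after the first 'energy' header line, position of the first following 'total' line) and a slice-plus-map comprehension over the lines between them.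
import Mathlib
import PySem

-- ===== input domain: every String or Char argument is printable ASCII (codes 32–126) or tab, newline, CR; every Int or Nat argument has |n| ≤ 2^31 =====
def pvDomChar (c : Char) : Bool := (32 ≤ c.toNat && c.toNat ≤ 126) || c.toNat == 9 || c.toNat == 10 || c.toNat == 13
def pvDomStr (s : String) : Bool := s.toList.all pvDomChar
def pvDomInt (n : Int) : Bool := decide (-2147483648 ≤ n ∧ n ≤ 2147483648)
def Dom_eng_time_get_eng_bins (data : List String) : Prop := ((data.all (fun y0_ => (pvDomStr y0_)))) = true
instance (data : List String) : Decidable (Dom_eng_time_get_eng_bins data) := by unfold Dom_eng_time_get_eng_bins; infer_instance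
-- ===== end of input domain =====

-- B replaces A's one-loop boolean-flag state machine by two index computations (find the
-- 'energy' header, find the 'total' terminator) followed by a slice + map; same cost, more idiomatic.

-- ===== PORT A =====
-- the for-loop of A: state = (in_data, energy_bins); 'break' returns the accumulator
def engLoopA : Bool → List String → List String → List String
  | _, acc, [] => acc
  | inData, acc, line :: rest =>
    if inData then
      if PySem.Str.isIn "total" line then acc   -- in_data = False; break
      else
        let line2 := PySem.Str.join " " (PySem.Str.split₀ line)
        -- line2.split(" ")[0]: sep " " is nonempty so split? is some, and split(sep) is
        -- never the empty list, so the [0] indexing is total — getD/headD are unreachable defaults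
        let erg := ((PySem.Str.split? line2 " ").getD []).headD ""
        engLoopA true (acc ++ [erg]) rest
    else
      if PySem.Str.isIn "energy" line then engLoopA true acc rest
      else engLoopA false acc rest

def eng_time_get_eng_bins (data : List String) : List String :=
  engLoopA false [] data ++ ["total"]

-- ===== PORT B =====
def firstToken (line : String) : String :=
  match PySem.Str.split₀ line with
  | [] => ""
  | p :: _ => p

-- next((i + 1 for i, l in enumerate(lines) if "energy" in l), n)
def findEnergyStart : List String → Nat
  | [] => 0
  | l :: ls => if PySem.Str.isIn "energy" l then 1 else 1 + findEnergyStart ls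

-- next((j for j in range(start, n) if "total" in lines[j]), n): the scan over indices
-- start..n-1 of lines is a scan over the suffix lines[start:], result relative to start
def findTotalStop : List String → Nat
  | [] => 0
  | l :: ls => if PySem.Str.isIn "total" l then 0 else 1 + findTotalStop ls

def eng_time_get_eng_bins_alt (data : List String) : List String :=
  let start := findEnergyStart data
  let stop := start + findTotalStop (data.drop start)
  (PySem.List.slice data (some (start : Int)) (some (stop : Int))).map firstToken ++ ["total"]

-- ===== PRECONDITION & SPEC =====
def Spec_eng_time_get_eng_bins (data : List String) (out : List String) : Prop := out = eng_time_get_eng_bins_alt data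
instance (data : List String) (out : List String) : Decidable (Spec_eng_time_get_eng_bins data out) := by unfold Spec_eng_time_get_eng_bins; infer_instance

-- ===== CLAIM (what is proved, stated in full; the proofs are below) =====
def Claim_equal_eng_time_get_eng_bins : Prop := ∀ (data : List String), Dom_eng_time_get_eng_bins data → Spec_eng_time_get_eng_bins data (eng_time_get_eng_bins data)

-- ===== LEMMAS AND PROOFS =====

-- getLast? of a cons with a nonempty tail
theorem pv_getLast?_cons_ne {α : Type} (x : α) (acc : List α) (h : acc ≠ []) :
    (x :: acc).getLast? = acc.getLast? := by
  obtain ⟨y, hy⟩ := Option.isSome_iff_exists.mp (List.getLast?_isSome.mpr h)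
  rw [List.getLast?_cons, hy]
  simp

-- head of splitOn.go once the first chunk has been committed to acc
theorem splitOn_go_head_of_acc_ne_nil (sep : List Char) :
    ∀ (fuel : Nat) (l cur : List Char) (acc : List (List Char)), acc ≠ [] →
      (PySem.Chars.splitOn.go sep fuel l cur acc).head? = acc.getLast? := by
  intro fuel
  induction fuel with
  | zero =>
    intro l cur acc h
    rw [PySem.Chars.splitOn.go, List.head?_reverse, pv_getLast?_cons_ne _ _ h]
  | succ fuel ih =>
    intro l cur acc h
    cases l with
    | nil =>
      rw [PySem.Chars.splitOn.go, List.head?_reverse, pv_getLast?_cons_ne _ _ h]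
      omega
    | cons c rest =>
      rw [PySem.Chars.splitOn.go]
      by_cases hp : sep.isPrefixOf (c :: rest)
      · simp only [hp, if_true]
        rw [ih _ _ _ (by simp), pv_getLast?_cons_ne _ _ h]
      · simp only [hp, Bool.false_eq_true, if_false]
        exact ih _ _ _ h

-- head of splitOn.go while still inside the first chunk
theorem splitOn_go_head_take :
    ∀ (fuel : Nat) (l cur : List Char), l.length < fuel →
      (PySem.Chars.splitOn.go [' '] fuel l cur []).head? =
        some (cur.reverse ++ l.takeWhile (fun d => !(d == ' '))) := by
  intro fuel
  induction fuel with
  | zero => intro l cur h; exact absurd h (Nat.not_lt_zero _)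
  | succ fuel ih =>
    intro l cur h
    cases l with
    | nil => simp [PySem.Chars.splitOn.go]
    | cons c rest =>
      rw [PySem.Chars.splitOn.go]
      by_cases hc : c = ' '
      · subst hc
        have hp : [' '].isPrefixOf (' ' :: rest) = true := by simp [List.isPrefixOf]
        simp only [hp, if_true]
        rw [splitOn_go_head_of_acc_ne_nil _ _ _ _ _ (by simp)]
        simp [List.takeWhile]
      · have hp : [' '].isPrefixOf (c :: rest) = false := by
          simp only [List.isPrefixOf, Bool.and_eq_false_iff]
          left
          exact beq_eq_false_iff_ne.mpr (fun h' => hc h'.symm)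
        simp only [hp, Bool.false_eq_true, if_false]
        rw [ih rest (c :: cur) (by simpa using Nat.lt_of_succ_lt_succ h)]
        have hcb : (!(c == ' ')) = true := by simp [hc]
        simp [List.takeWhile, hcb]

-- every character of every word produced by split₀ is non-whitespace
theorem split₀_go_no_space :
    ∀ (l cur : List Char) (acc : List (List Char)),
      (∀ w ∈ acc, ∀ c ∈ w, PySem.Chars.isspace c = false) →
      (∀ c ∈ cur, PySem.Chars.isspace c = false) →
      ∀ w ∈ PySem.Chars.split₀.go l cur acc, ∀ c ∈ w, PySem.Chars.isspace c = false := by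
  intro l
  induction l with
  | nil =>
    intro cur acc hacc hcur w hw
    by_cases hc : cur.isEmpty
    · simp only [PySem.Chars.split₀.go, hc, if_true, List.mem_reverse] at hw
      exact hacc w hw
    · simp only [PySem.Chars.split₀.go, hc, Bool.false_eq_true, if_false,
        List.mem_reverse, List.mem_cons] at hw
      rcases hw with hw | hw
      · subst hw; intro c hcm; exact hcur c (List.mem_reverse.mp hcm)
      · exact hacc w hw
  | cons c rest ih =>
    intro cur acc hacc hcur w hw
    rw [PySem.Chars.split₀.go] at hw
    by_cases hs : PySem.Chars.isspace c
    · simp only [hs, if_true] at hw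
      by_cases hc : cur.isEmpty
      · simp only [hc, if_true] at hw
        exact ih [] acc hacc (by simp) w hw
      · simp only [hc, Bool.false_eq_true, if_false] at hw
        refine ih [] (cur.reverse :: acc) ?_ (by simp) w hw
        intro w' hw' c' hc'
        rcases List.mem_cons.mp hw' with h | h
        · subst h; exact hcur c' (List.mem_reverse.mp hc')
        · exact hacc w' h c' hc'
    · simp only [hs, Bool.false_eq_true, if_false] at hw
      refine ih (c :: cur) acc hacc ?_ w hw
      intro c' hc'
      rcases List.mem_cons.mp hc' with h | h
      · subst h; simpa using hs
      · exact hcur c' h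

theorem split₀_no_space (s : List Char) :
    ∀ w ∈ PySem.Chars.split₀ s, ∀ c ∈ w, PySem.Chars.isspace c = false := by
  simpa [PySem.Chars.split₀] using split₀_go_no_space s [] [] (by simp) (by simp)

-- the Chars-level token round-trip: the first chunk of ' '.join(words).split(' ') is the first word
theorem chars_token (s : List Char) :
    (PySem.Chars.splitOn (PySem.Chars.join [' '] (PySem.Chars.split₀ s)) [' ']).head? =
      some ((PySem.Chars.split₀ s).headD []) := by
  have hmain : ∀ (x : List Char),
      (PySem.Chars.splitOn x [' ']).head? = some (x.takeWhile (fun d => !(d == ' '))) := by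
    intro x
    rw [PySem.Chars.splitOn]
    exact splitOn_go_head_take _ _ _ (by omega)
  rw [hmain]
  cases h : PySem.Chars.split₀ s with
  | nil => simp [PySem.Chars.join_nil]
  | cons w ws =>
    have hw : ∀ c ∈ w, (fun d => !(d == ' ')) c = true := by
      intro c hc
      have hns := split₀_no_space s w (h ▸ List.mem_cons_self) c hc
      show (!(c == ' ')) = true
      cases hcc : c == ' '
      · simp
      · have : c = ' ' := by exact eq_of_beq hcc
        subst this
        exact absurd hns (by decide)
    cases ws with
    | nil =>
      rw [PySem.Chars.join_singleton, List.takeWhile_eq_self_iff.mpr hw]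
      simp
    | cons w2 ws' =>
      rw [PySem.Chars.join_cons_cons, List.append_assoc, List.takeWhile_append_of_pos hw]
      simp

-- the String-level token: A's per-line expression equals B's firstToken
theorem token_eq (s : String) :
    ((PySem.Str.split? (PySem.Str.join " " (PySem.Str.split₀ s)) " ").getD []).headD "" =
      firstToken s := by
  have hsepl : (" " : String).toList = [' '] := rfl
  simp only [PySem.Str.split?, PySem.Str.join, PySem.Str.split₀, firstToken]
  rw [hsepl]
  simp only [PySem.Chars.split?, List.isEmpty_cons]
  have htl : (String.ofList (PySem.Chars.join [' ']
      (List.map String.toList (List.map String.ofList (PySem.Chars.split₀ s.toList))))).toList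
      = PySem.Chars.join [' '] (PySem.Chars.split₀ s.toList) := by
    simp [List.map_map, Function.comp_def]
  rw [htl]
  have := chars_token s.toList
  cases h : PySem.Chars.split₀ s.toList with
  | nil =>
    rw [h] at this
    simp only [List.headD_nil] at this ⊢
    simp [List.head?_map]
    rfl
  | cons w ws =>
    rw [h] at this
    simp only [List.headD_cons] at this
    simp [List.head?_map, this]

-- phase 2: with the flag set, A's loop maps the token of every line up to the 'total' line
theorem engLoopA_true (ls : List String) :
    ∀ acc, engLoopA true acc ls = acc ++ (ls.take (findTotalStop ls)).map firstToken := by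
  induction ls with
  | nil => intro acc; simp [engLoopA, findTotalStop]
  | cons l ls ih =>
    intro acc
    by_cases h : PySem.Str.isIn "total" l = true
    · simp only [engLoopA, findTotalStop, h, if_true, List.take_zero, List.map_nil,
        List.append_nil]
    · have h' : PySem.Str.isIn "total" l = false := Bool.eq_false_iff.mpr h
      simp only [engLoopA, findTotalStop, h', Bool.false_eq_true, if_false, if_true]
      rw [ih, token_eq, Nat.add_comm 1]
      simp [List.take_succ_cons]

-- phase 1: with the flag clear, A's loop skips up to and including the first 'energy' line
theorem engLoopA_false (ls : List String) :
    ∀ acc, engLoopA false acc ls = engLoopA true acc (ls.drop (findEnergyStart ls)) := by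
  induction ls with
  | nil => intro acc; rfl
  | cons l ls ih =>
    intro acc
    by_cases h : PySem.Str.isIn "energy" l = true
    · simp only [engLoopA, findEnergyStart, h, if_true, Bool.false_eq_true, if_false,
        List.drop_succ_cons, List.drop_zero]
    · have h' : PySem.Str.isIn "energy" l = false := Bool.eq_false_iff.mpr h
      simp only [engLoopA, findEnergyStart, h', Bool.false_eq_true, if_false]
      rw [ih, Nat.add_comm 1, List.drop_succ_cons]

-- ===== VERDICT (by name: the statement is the Claim_ definition above) =====
theorem eng_time_get_eng_bins_spec : Claim_equal_eng_time_get_eng_bins := by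
  unfold Claim_equal_eng_time_get_eng_bins
  intro data _
  simp only [Spec_eng_time_get_eng_bins, eng_time_get_eng_bins, eng_time_get_eng_bins_alt]
  rw [engLoopA_false, engLoopA_true, List.nil_append,
    PySem.List.slice_toNat data (Int.natCast_nonneg _) (Int.natCast_nonneg _)]
  simp only [Int.toNat_natCast, Nat.add_sub_cancel_left]
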